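-- pv_equiv track=rewrite | github.com/smhwang0109/TIL | SSAFY Test/서울_1반_황수민/07.py | q7
-- ===== SOURCE A (Python) =====
-- def q7(n):
--     num_list = [0,1,2,3,4,5]
--     count = 0
--     for num1 in num_list[1:]:
--         for num2 in num_list:
--             if num1 != num2:
--                 if n == num1 + num2:
--                     count += 1
--     return count*4
-- ===== SOURCE B (Python) =====
-- def q7(n):
--     table = {1: 1, 2: 1, 3: 3, 4: 3, 5: 5, 6: 4, 7: 4, 8: 2, 9: 2}
--     return table.get(n, 0) * 4
-- ===== Notes on version B (the rewrite author's own statement) =====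
-- stated objective: simpler
-- what changed: Replaces the nested-loop scan over all ordered pairs with a single lookup in a precomputed table of pair counts per sum.
import Mathlib
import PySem

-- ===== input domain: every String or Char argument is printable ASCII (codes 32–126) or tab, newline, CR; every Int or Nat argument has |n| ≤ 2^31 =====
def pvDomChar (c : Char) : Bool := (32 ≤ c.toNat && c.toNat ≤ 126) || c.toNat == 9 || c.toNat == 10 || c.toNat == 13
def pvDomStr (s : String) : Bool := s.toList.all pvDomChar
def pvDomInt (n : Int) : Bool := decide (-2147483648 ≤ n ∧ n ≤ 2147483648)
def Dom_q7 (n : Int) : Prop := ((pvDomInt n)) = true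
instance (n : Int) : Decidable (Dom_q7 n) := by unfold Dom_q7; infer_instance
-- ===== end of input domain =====

-- B replaces A's nested-loop scan over all ordered pairs with a single lookup in a precomputed
-- table of ordered-pair counts per sum (objective: simpler).

-- ===== PORT A =====
-- Literal port: for num1 in num_list[1:]: for num2 in num_list: nested ifs, count*4.
def q7 (n : Int) : Int :=
  let num_list : List Int := [0,1,2,3,4,5]
  let count :=
    (PySem.List.slice num_list (some 1) none).foldl (fun count num1 =>
      num_list.foldl (fun count num2 =>
        if num1 != num2 then
          if n == num1 + num2 then count + 1 else count
        else count) count) 0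
  count * 4

-- ===== PORT B =====
-- Port of B: dict literal mapping each attainable sum to its ordered-pair count; table.get(n, 0) * 4.
def q7_table : PySem.Dict Int Int :=
  PySem.Dict.mk [(1,1),(2,1),(3,3),(4,3),(5,5),(6,4),(7,4),(8,2),(9,2)]
def q7_alt (n : Int) : Int :=
  (PySem.Dict.getD q7_table n 0) * 4

-- ===== PRECONDITION & SPEC =====
def Spec_q7 (n : Int) (out : Int) : Prop := out = q7_alt n
instance (n : Int) (out : Int) : Decidable (Spec_q7 n out) := by unfold Spec_q7; infer_instance

-- ===== CLAIM (what is proved, stated in full; the proofs are below) =====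
def Claim_equal_q7 : Prop := ∀ (n : Int), Dom_q7 n → Spec_q7 n (q7 n)

-- ===== LEMMAS AND PROOFS =====

-- A's double loop counts, for each num1 in [1..5], the num2 in [0..5] with num1 ≠ num2
-- and n = num1 + num2; q7_count states this as a sum of countP's.
theorem q7_count (n : Int) :
    q7 n = (([1,2,3,4,5] : List Int).map (fun num1 =>
      ((([0,1,2,3,4,5] : List Int).countP
        (fun num2 => num1 != num2 && n == num1 + num2)) : Int))).sum * 4 := by
  have hinner : ∀ (num1 c : Int),
      ([0,1,2,3,4,5] : List Int).foldl (fun c num2 =>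
        if num1 != num2 then if n == num1 + num2 then c + 1 else c else c) c
      = c + (([0,1,2,3,4,5] : List Int).countP
          (fun num2 => num1 != num2 && n == num1 + num2) : Int) := by
    intro num1 c
    rw [← PySem.List.foldl_if_add_one]
    apply PySem.List.foldl_congr_mem
    intro acc x _
    by_cases h1 : (num1 != x) = true <;> by_cases h2 : (n == num1 + x) = true <;>
      simp [h1, h2]
  simp only [q7]
  rw [PySem.List.slice_from_one]
  simp only [List.tail_cons]
  simp only [hinner]
  rw [PySem.List.foldl_add (g := fun num1 =>
    (([0,1,2,3,4,5] : List Int).countP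
      (fun num2 => num1 != num2 && n == num1 + num2) : Int))]
  simp

theorem q7_eq_alt (n : Int) : q7 n = q7_alt n := by
  rw [q7_count]
  by_cases h1 : n = 1; · subst h1; decide
  by_cases h2 : n = 2; · subst h2; decide
  by_cases h3 : n = 3; · subst h3; decide
  by_cases h4 : n = 4; · subst h4; decide
  by_cases h5 : n = 5; · subst h5; decide
  by_cases h6 : n = 6; · subst h6; decide
  by_cases h7 : n = 7; · subst h7; decide
  by_cases h8 : n = 8; · subst h8; decide
  by_cases h9 : n = 9; · subst h9; decide
  -- n outside 1..9: every pair fails, and the table lookup misses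
  have hz : ∀ num1 ∈ ([1,2,3,4,5] : List Int),
      (([0,1,2,3,4,5] : List Int).countP
        (fun num2 => num1 != num2 && n == num1 + num2)) = 0 := by
    intro num1 hm
    rw [List.countP_eq_zero]
    intro x hx
    fin_cases hm <;> fin_cases hx <;> simp <;> omega
  have halt : q7_alt n = 0 := by
    simp only [q7_alt, q7_table, PySem.Dict.getD, PySem.Dict.get?_mk_cons]
    simp only [beq_iff_eq]
    split_ifs <;> simp_all [PySem.Dict.get?]
  rw [halt]
  rw [List.map_congr_left (fun a ha => by rw [hz a ha])]
  simp

-- ===== VERDICT (by name: the statement is the Claim_ definition above) =====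
theorem q7_spec : Claim_equal_q7 := by
  intro n _
  unfold Spec_q7
  exact q7_eq_alt n
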